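-- pv_equiv track=rewrite | github.com/diemort/madminer | madminer/sampling.py | _build_sets
-- ===== SOURCE A (Python) =====
-- def _build_sets(thetas, nus):
--     if len(nus) != len(thetas):
--         raise RuntimeError("Mismatching thetas and nus: {} vs {}".format(len(thetas), len(nus)))
--
--     n_sets = max([len(param) for param in thetas + nus])
--     sets = [[] for _ in range(n_sets)]
--
--     for (theta, nu) in zip(thetas, nus):
--         n_theta_sets_before = len(theta)
--         n_nu_sets_before = len(nu)
--
--         for i_set in range(n_sets):
--             sets[i_set].append((theta[i_set % n_theta_sets_before], nu[i_set % n_nu_sets_before]))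
--
--     return sets
-- ===== SOURCE B (Python) =====
-- def _build_sets(thetas, nus):
--     if len(nus) != len(thetas):
--         raise RuntimeError("Mismatching thetas and nus: {} vs {}".format(len(thetas), len(nus)))
--
--     n_sets = max([len(param) for param in thetas + nus])
--
--     # Row-major single pass: one incremental wraparound cursor per pair,
--     # no modulo arithmetic and no transpose.
--     pairs = list(zip(thetas, nus))
--     cursors = [(0, 0) for _ in pairs]
--     sets = []
--     for _ in range(n_sets):
--         row = []
--         new_cursors = []
--         for (theta, nu), (it, iu) in zip(pairs, cursors):
--             row.append((theta[it], nu[iu]))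
--             it += 1
--             if it == len(theta):
--                 it = 0
--             iu += 1
--             if iu == len(nu):
--                 iu = 0
--             new_cursors.append((it, iu))
--         cursors = new_cursors
--         sets.append(row)
--     return sets
-- ===== Notes on version B (the rewrite author's own statement) =====
-- stated objective: alternative
-- what changed: B generates the result row-major in a single pass, carrying one incremental wraparound cursor pair per (theta, nu) across rows (no modulo arithmetic, no preallocated rows, no transpose), whereas A iterates pair-major and appends theta[i % len] into preallocated row lists.
import Mathlib
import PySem

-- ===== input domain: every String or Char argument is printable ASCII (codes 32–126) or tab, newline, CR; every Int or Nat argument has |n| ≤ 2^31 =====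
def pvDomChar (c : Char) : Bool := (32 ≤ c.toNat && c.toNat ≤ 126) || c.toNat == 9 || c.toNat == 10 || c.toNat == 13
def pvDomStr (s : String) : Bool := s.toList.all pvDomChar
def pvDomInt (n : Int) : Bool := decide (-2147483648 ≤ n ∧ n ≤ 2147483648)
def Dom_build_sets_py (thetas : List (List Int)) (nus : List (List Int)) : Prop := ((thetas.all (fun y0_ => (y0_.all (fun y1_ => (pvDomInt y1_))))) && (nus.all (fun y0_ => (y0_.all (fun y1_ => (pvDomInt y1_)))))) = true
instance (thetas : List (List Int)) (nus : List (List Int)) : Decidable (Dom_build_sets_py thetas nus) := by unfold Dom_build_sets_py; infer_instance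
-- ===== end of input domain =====

-- B generates the rows in a single row-major pass, carrying one incremental wraparound
-- cursor pair per (theta, nu) across rows — no modulo indexing and no preallocated rows
-- (alternative decomposition; same asymptotic cost).

-- ===== PORT A =====
-- literal port of A: guard, n_sets = max(lengths), pre-allocated rows, pair-major append loop
def build_sets_py (thetas : List (List Int)) (nus : List (List Int)) : List (List (Int × Int)) :=
  if PySem.List.len nus ≠ PySem.List.len thetas then [] -- RuntimeError in Python; excluded by Pre_
  else
    match PySem.List.max? ((thetas ++ nus).map (fun param => PySem.List.len param)) (fun x => x) with
    | none => [] -- max() of an empty list: ValueError in Python; excluded by Pre_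
    | some n_sets =>
      (thetas.zip nus).foldl (fun sets tn =>
        (PySem.List.pyRange 0 n_sets 1).foldl (fun sets i_set =>
          PySem.List.pySetD sets i_set
            ((PySem.List.pyGetD sets i_set []) ++
              [(PySem.List.pyGetD tn.1 (PySem.Int.mod i_set (PySem.List.len tn.1)) 0,
                PySem.List.pyGetD tn.2 (PySem.Int.mod i_set (PySem.List.len tn.2)) 0)])) sets)
        ((PySem.List.pyRange 0 n_sets 1).map (fun _ => []))

-- ===== PORT B =====
-- Source B's inner body: emit (theta[it], nu[iu]) and advance both cursors with wraparound reset
def pvRowStep (acc : List (Int × Int) × List (Int × Int))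
    (pc : (List Int × List Int) × (Int × Int)) : List (Int × Int) × List (Int × Int) :=
  (acc.1 ++ [(PySem.List.pyGetD pc.1.1 pc.2.1 0, PySem.List.pyGetD pc.1.2 pc.2.2 0)],
   acc.2 ++ [((if pc.2.1 + 1 = PySem.List.len pc.1.1 then 0 else pc.2.1 + 1),
              (if pc.2.2 + 1 = PySem.List.len pc.1.2 then 0 else pc.2.2 + 1))])

-- Source B's per-row body: build the row and the new cursor list, append the row
def pvSetStep (pairs : List (List Int × List Int))
    (st : List (List (Int × Int)) × List (Int × Int)) :
    List (List (Int × Int)) × List (Int × Int) :=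
  let inner := (pairs.zip st.2).foldl pvRowStep (([] : List (Int × Int)), ([] : List (Int × Int)))
  (st.1 ++ [inner.1], inner.2)

-- literal port of Source B: same guard and n_sets; then a single row-major pass over
-- range(n_sets) carrying (rows so far, cursor pair per (theta, nu))
def build_sets_py_alt (thetas : List (List Int)) (nus : List (List Int)) : List (List (Int × Int)) :=
  if PySem.List.len nus ≠ PySem.List.len thetas then [] -- RuntimeError in Python; excluded by Pre_
  else
    match PySem.List.max? ((thetas ++ nus).map (fun param => PySem.List.len param)) (fun x => x) with
    | none => [] -- ValueError; excluded by Pre_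
    | some n_sets =>
      ((PySem.List.pyRange 0 n_sets 1).foldl
        (fun st _ => pvSetStep (thetas.zip nus) st)
        (([] : List (List (Int × Int))), (thetas.zip nus).map (fun _ => ((0 : Int), (0 : Int))))).1

-- ===== PRECONDITION & SPEC =====
-- Pre_ excludes exactly the inputs on which A raises: mismatched outer lengths (RuntimeError),
-- both outer lists empty (ValueError from max of []), and a mix of empty and non-empty
-- parameter lists (ZeroDivisionError from i_set % 0); B raises on exactly the same inputs.
def Pre_build_sets_py (thetas : List (List Int)) (nus : List (List Int)) : Prop :=
  thetas.length = nus.length ∧ thetas ≠ [] ∧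
    ((∀ t ∈ thetas, t ≠ []) ∧ (∀ u ∈ nus, u ≠ []) ∨ (∀ t ∈ thetas, t = []) ∧ (∀ u ∈ nus, u = []))
instance (thetas : List (List Int)) (nus : List (List Int)) : Decidable (Pre_build_sets_py thetas nus) := by unfold Pre_build_sets_py; infer_instance

def pvWitness_build_sets_py : List (List Int) × List (List Int) := ([[1], [2, 3]], [[4, 5], [6]])

def Spec_build_sets_py (thetas : List (List Int)) (nus : List (List Int)) (out : List (List (Int × Int))) : Prop := out = build_sets_py_alt thetas nus
instance (thetas : List (List Int)) (nus : List (List Int)) (out : List (List (Int × Int))) : Decidable (Spec_build_sets_py thetas nus out) := by unfold Spec_build_sets_py; infer_instance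

-- ===== CLAIM (what is proved, stated in full; the proofs are below) =====
def Claim_equal_build_sets_py : Prop := ∀ (thetas : List (List Int)) (nus : List (List Int)), Dom_build_sets_py thetas nus → Pre_build_sets_py thetas nus → Spec_build_sets_py thetas nus (build_sets_py thetas nus)

-- ===== LEMMAS AND PROOFS =====

-- the element both programs produce for pair tn at set index i (proof-only abbreviation)
def pvF (tn : List Int × List Int) (i : Int) : Int × Int :=
  (PySem.List.pyGetD tn.1 (PySem.Int.mod i (PySem.List.len tn.1)) 0,
   PySem.List.pyGetD tn.2 (PySem.Int.mod i (PySem.List.len tn.2)) 0)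

-- B's cursor state for pair p after k rows (proof-only abbreviation)
def pvCur (k : Nat) (p : List Int × List Int) : Int × Int :=
  (((k % p.1.length : Nat) : Int), ((k % p.2.length : Nat) : Int))

-- ---------- A-side lemmas ----------

-- the pure set-fold underlying A's inner loop, on Nat indices
lemma pvSetFold (x : Nat → Int × Int) :
    ∀ (m : Nat) (s : List (List (Int × Int))), m ≤ s.length →
    (List.range m).foldl (fun s k => s.set k (s.getD k [] ++ [x k])) s
      = (List.range m).map (fun k => s.getD k [] ++ [x k]) ++ s.drop m := by
  intro m
  induction m with
  | zero => intro s _; simp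
  | succ m ih =>
    intro s hs
    rw [List.range_succ, List.foldl_append, ih s (by omega), List.map_append]
    have hm : m < s.length := by omega
    have hlen : ((List.range m).map (fun k => s.getD k [] ++ [x k])).length = m := by simp
    simp only [List.foldl_cons, List.foldl_nil]
    rw [List.drop_eq_getElem_cons hm]
    rw [List.getD_eq_getElem?_getD, List.getElem?_append_right (by omega)]
    rw [List.set_append_right _ _ (by omega)]
    simp [List.getD_eq_getElem?_getD]
    rw [List.drop_eq_getElem_cons hm, List.set_cons_zero]

-- A's inner pass over pyRange, reduced to a map over List.range
lemma pvInnerPass (f : Int → Int × Int) (n : Nat) (s : List (List (Int × Int))) (hs : s.length = n) :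
    (PySem.List.pyRange 0 (n : Int) 1).foldl
      (fun s i => PySem.List.pySetD s i (PySem.List.pyGetD s i [] ++ [f i])) s
      = (List.range n).map (fun k => s.getD k [] ++ [f (k : Int)]) := by
  rw [PySem.List.pyRange_one, List.foldl_map]
  simp only [sub_zero, Int.toNat_natCast, zero_add, PySem.List.pySetD_natCast, PySem.List.pyGetD_natCast]
  rw [pvSetFold (fun k => f ↑k) n s (by omega)]
  simp [hs]

-- A's outer fold over the pairs, starting from rows given by g
lemma pvOuterFold (f : (List Int × List Int) → Int → Int × Int) (n : Nat) :
    ∀ (ps : List (List Int × List Int)) (g : Nat → List (Int × Int)),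
    ps.foldl (fun sets tn =>
        (PySem.List.pyRange 0 (n : Int) 1).foldl
          (fun sets i => PySem.List.pySetD sets i (PySem.List.pyGetD sets i [] ++ [f tn i])) sets)
      ((List.range n).map g)
      = (List.range n).map (fun k => g k ++ ps.map (fun tn => f tn (k : Int))) := by
  intro ps
  induction ps with
  | nil => intro g; simp
  | cons p t ih =>
    intro g
    rw [List.foldl_cons, pvInnerPass (f p) n _ (by simp)]
    have hstep : (List.range n).map (fun k => ((List.range n).map g).getD k [] ++ [f p (k : Int)])
        = (List.range n).map (fun k => g k ++ [f p (k : Int)]) := by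
      apply List.map_congr_left
      intro k hk
      rw [List.getD_eq_getElem?_getD, List.getElem?_map, List.getElem?_range (List.mem_range.mp hk)]
      rfl
    rw [hstep, ih (fun k => g k ++ [f p (k : Int)])]
    simp

-- ---------- B-side lemmas ----------

-- successor of a wraparound cursor (Nat form)
lemma pvSuccMod (k L : Nat) (hL : 0 < L) :
    (k + 1) % L = if k % L + 1 = L then 0 else k % L + 1 := by
  have hrepr : k + 1 = (k % L + 1) + L * (k / L) := by
    have := Nat.mod_add_div k L; omega
  have hlt : k % L < L := Nat.mod_lt k hL
  rw [hrepr, Nat.add_mul_mod_self_left]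
  split_ifs with h
  · rw [h, Nat.mod_self]
  · exact Nat.mod_eq_of_lt (by omega)

-- B's inner pass: from cursors pvCur k it emits row k and advances every cursor
lemma pvInnerB (k : Nat) :
    ∀ (ps : List (List Int × List Int)), (∀ p ∈ ps, p.1 ≠ [] ∧ p.2 ≠ []) →
    ∀ (acc : List (Int × Int) × List (Int × Int)),
    (ps.zip (ps.map (pvCur k))).foldl pvRowStep acc
      = (acc.1 ++ ps.map (fun p => pvF p (k : Int)), acc.2 ++ ps.map (pvCur (k + 1))) := by
  intro ps
  induction ps with
  | nil => intro _ acc; simp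
  | cons p t ih =>
    intro hne acc
    have hp := hne p (by simp)
    have hL1 : 0 < p.1.length := List.length_pos_iff.mpr hp.1
    have hL2 : 0 < p.2.length := List.length_pos_iff.mpr hp.2
    simp only [List.map_cons, List.zip_cons_cons, List.foldl_cons]
    rw [ih (fun q hq => hne q (by simp [hq]))]
    have hval : (PySem.List.pyGetD p.1 (pvCur k p).1 0, PySem.List.pyGetD p.2 (pvCur k p).2 0)
        = pvF p (k : Int) := by
      simp [pvCur, pvF]
    have hcur : (((if (pvCur k p).1 + 1 = PySem.List.len p.1 then 0 else (pvCur k p).1 + 1) : Int),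
                 ((if (pvCur k p).2 + 1 = PySem.List.len p.2 then 0 else (pvCur k p).2 + 1) : Int))
        = pvCur (k + 1) p := by
      unfold pvCur
      simp only [PySem.List.len_eq]
      congr 1
      · rw [pvSuccMod k p.1.length hL1]
        split_ifs with h1 h2 h2
        · rfl
        · exact absurd (by exact_mod_cast h1) h2
        · exact absurd (by exact_mod_cast h2) h1
        · push_cast; ring
      · rw [pvSuccMod k p.2.length hL2]
        split_ifs with h1 h2 h2
        · rfl
        · exact absurd (by exact_mod_cast h1) h2
        · exact absurd (by exact_mod_cast h2) h1
        · push_cast; ring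
    simp only [pvRowStep]
    rw [hval, hcur]
    simp

-- B's outer fold: m more rows after k rows already produced
lemma pvOuterB (ps : List (List Int × List Int)) (hne : ∀ p ∈ ps, p.1 ≠ [] ∧ p.2 ≠ []) :
    ∀ (m k : Nat) (acc : List (List (Int × Int))),
    (List.range m).foldl (fun st _ => pvSetStep ps st) (acc, ps.map (pvCur k))
      = (acc ++ (List.range m).map (fun j => ps.map (fun p => pvF p ((k + j : Nat) : Int))),
         ps.map (pvCur (k + m))) := by
  intro m
  induction m with
  | zero => intro k acc; simp
  | succ m ih =>
    intro k acc
    rw [List.range_succ, List.foldl_append, ih k acc]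
    simp only [List.foldl_cons, List.foldl_nil, pvSetStep]
    rw [pvInnerB (k + m) ps hne (([] : List (Int × Int)), ([] : List (Int × Int)))]
    simp only [List.nil_append]
    simp [List.append_assoc, Nat.add_assoc]

-- ===== VERDICT (by name: the statement is the Claim_ definition above) =====
theorem build_sets_py_spec : Claim_equal_build_sets_py := by
  intro thetas nus _ hpre
  obtain ⟨hlen, hne, hdisj⟩ := hpre
  unfold Spec_build_sets_py build_sets_py build_sets_py_alt
  have hlen' : PySem.List.len nus = PySem.List.len thetas := by
    simp [PySem.List.len_eq, hlen]
  rw [hlen']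
  simp only [ne_eq, not_true_eq_false, if_false]
  cases hM : PySem.List.max? ((thetas ++ nus).map (fun param => PySem.List.len param)) (fun x => x) with
  | none => rfl
  | some n =>
    have hn0 : 0 ≤ n := by
      have hmem := PySem.List.max?_mem hM
      obtain ⟨p, _, hp⟩ := List.mem_map.mp hmem
      simp [PySem.List.len_eq] at hp
      omega
    obtain ⟨N, rfl⟩ : ∃ N : Nat, n = (N : Int) := ⟨n.toNat, (Int.toNat_of_nonneg hn0).symm⟩
    -- fold A's body into the shared element function pvF
    show (thetas.zip nus).foldl (fun sets tn =>
        (PySem.List.pyRange 0 (N : Int) 1).foldl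
          (fun sets i => PySem.List.pySetD sets i (PySem.List.pyGetD sets i [] ++ [pvF tn i])) sets)
        ((PySem.List.pyRange 0 (N : Int) 1).map (fun _ => []))
      = ((PySem.List.pyRange 0 (N : Int) 1).foldl
          (fun st _ => pvSetStep (thetas.zip nus) st)
          (([] : List (List (Int × Int))), (thetas.zip nus).map (fun _ => ((0 : Int), (0 : Int))))).1
    have hinit : (PySem.List.pyRange 0 (N : Int) 1).map (fun _ => ([] : List (Int × Int)))
        = (List.range N).map (fun _ => []) := by
      rw [PySem.List.pyRange_one, List.map_map]
      simp only [sub_zero, Int.toNat_natCast]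
      rfl
    rw [hinit, pvOuterFold pvF N (thetas.zip nus) (fun _ => [])]
    rcases Nat.eq_zero_or_pos N with hN | hN
    · -- n_sets = 0: both sides are []
      subst hN
      rw [PySem.List.pyRange_one]
      simp
    · -- n_sets > 0: under Pre_, every theta and nu is non-empty
      have hps : ∀ p ∈ thetas.zip nus, p.1 ≠ [] ∧ p.2 ≠ [] := by
        intro p hp
        have hmem := List.of_mem_zip hp
        rcases hdisj with ⟨h1, h2⟩ | ⟨h1, h2⟩
        · exact ⟨h1 p.1 hmem.1, h2 p.2 hmem.2⟩
        · -- all parameter lists empty forces N = 0, contradiction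
          exfalso
          have hmemN := PySem.List.max?_mem hM
          obtain ⟨q, hq, hqlen⟩ := List.mem_map.mp hmemN
          have hq0 : q = [] := by
            rcases List.mem_append.mp hq with h | h
            · exact h1 q h
            · exact h2 q h
          rw [hq0] at hqlen
          simp [PySem.List.len_eq] at hqlen
          omega
      have hcur0 : (thetas.zip nus).map (fun _ => ((0 : Int), (0 : Int)))
          = (thetas.zip nus).map (pvCur 0) := by
        apply List.map_congr_left; intro p _; simp [pvCur]
      have hfold : (PySem.List.pyRange 0 (N : Int) 1).foldl
            (fun st _ => pvSetStep (thetas.zip nus) st)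
            (([] : List (List (Int × Int))), (thetas.zip nus).map (pvCur 0))
          = (List.range N).foldl (fun st _ => pvSetStep (thetas.zip nus) st)
            (([] : List (List (Int × Int))), (thetas.zip nus).map (pvCur 0)) := by
        rw [PySem.List.pyRange_one, List.foldl_map]
        simp
      rw [hcur0, hfold, pvOuterB (thetas.zip nus) hps N 0 []]
      simp
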